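-- pv_equiv track=rewrite | github.com/WwzFwz/finoss-cobol-intel | src/cobol_intel/analysis/impact_analyzer.py | _bfs_callers
-- ===== SOURCE A (Python) =====
-- from collections import deque
--
-- def _bfs_callers(
--     start: str,
--     reverse_adj: dict[str, list[str]],
--     max_depth: int,
-- ) -> dict[str, int]:
--     """BFS from start through reverse adjacency, returning {program: distance}."""
--     visited: dict[str, int] = {}
--     queue: deque[tuple[str, int]] = deque([(start, 0)])
--
--     while queue:
--         current, depth = queue.popleft()
--         if depth > max_depth:
--             continue
--         for caller in reverse_adj.get(current, []):
--             if caller not in visited: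
--                 visited[caller] = depth + 1
--                 if depth + 1 < max_depth:
--                     queue.append((caller, depth + 1))
--
--     return visited
-- ===== SOURCE B (Python) =====
-- def _bfs_callers(
--     start: str,
--     reverse_adj: dict[str, list[str]],
--     max_depth: int,
-- ) -> dict[str, int]:
--     """Staged per-level expansion: gather the whole level's callers, ordered-dedup
--     with dict.fromkeys, filter against visited, bulk-assign the distance."""
--     visited: dict[str, int] = {}
--     if max_depth < 0:
--         return visited
--     level = [start]
--     d = 1
--     while level:
--         callers = [c for n in level for c in reverse_adj.get(n, [])]
--         level = [c for c in dict.fromkeys(callers) if c not in visited]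
--         for c in level:
--             visited[c] = d
--         if max_depth <= d:
--             break
--         d += 1
--     return visited
-- ===== Notes on version B (the rewrite author's own statement) =====
-- stated objective: alternative
-- what changed: Replaces the deque-driven BFS with per-node visited checks and (node, depth) tuples by a staged per-level expansion: each level's callers are gathered in one comprehension, ordered-deduplicated with dict.fromkeys, filtered against visited in a second pass, and bulk-assigned their distance, so no queue, no per-node depth bookkeeping and no interleaved visited/enqueue logic remain.
import Mathlib
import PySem

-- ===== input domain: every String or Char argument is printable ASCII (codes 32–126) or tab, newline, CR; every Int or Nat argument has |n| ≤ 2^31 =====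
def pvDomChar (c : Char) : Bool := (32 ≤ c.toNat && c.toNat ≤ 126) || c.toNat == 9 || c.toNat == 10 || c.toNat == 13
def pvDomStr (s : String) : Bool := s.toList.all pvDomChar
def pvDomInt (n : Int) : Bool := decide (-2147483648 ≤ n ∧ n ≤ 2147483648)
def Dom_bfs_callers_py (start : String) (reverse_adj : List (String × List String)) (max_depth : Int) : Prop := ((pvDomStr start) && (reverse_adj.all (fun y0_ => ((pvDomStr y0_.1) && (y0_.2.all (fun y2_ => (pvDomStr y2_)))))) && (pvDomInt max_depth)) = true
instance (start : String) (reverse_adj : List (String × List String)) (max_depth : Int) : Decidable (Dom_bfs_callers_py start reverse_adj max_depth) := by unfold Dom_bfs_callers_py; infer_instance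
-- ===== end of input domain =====

-- B replaces A's deque-driven BFS (per-node visited checks, (node, depth) tuples) by a staged
-- per-level expansion: gather the level's callers, ordered-dedup, filter against visited,
-- bulk-assign the distance; objective: alternative (same asymptotic cost).

-- reverse_adj.get(node, []) — first-match association-list lookup, used by both Pythons
def pvAdjGet (reverse_adj : List (String × List String)) (node : String) : List String :=
  (PySem.Dict.mk reverse_adj).getD node []

-- ===== PORT A =====
-- body of A's inner `for caller in …` loop: state = (visited, queue)
def pvStepA (max_depth depth : Int)
    (st : PySem.Dict String Int × List (String × Int)) (caller : String) :
    PySem.Dict String Int × List (String × Int) :=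
  if (st.1.get? caller).isNone then
    (st.1.insert caller (depth + 1),
     if depth + 1 < max_depth then st.2 ++ [(caller, depth + 1)] else st.2)
  else st

-- A's `while queue` loop; fuel only makes the recursion total (it never runs out, see the proofs)
def pvLoopA (reverse_adj : List (String × List String)) (max_depth : Int) :
    Nat → List (String × Int) → PySem.Dict String Int → PySem.Dict String Int
  | 0, _, visited => visited
  | _ + 1, [], visited => visited
  | fuel + 1, (current, depth) :: rest, visited =>
    if max_depth < depth then pvLoopA reverse_adj max_depth fuel rest visited
    else
      let r := (pvAdjGet reverse_adj current).foldl (pvStepA max_depth depth) (visited, rest)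
      pvLoopA reverse_adj max_depth fuel r.2 r.1

def bfs_callers_py (start : String) (reverse_adj : List (String × List String)) (max_depth : Int) : List (String × Int) :=
  (pvLoopA reverse_adj max_depth (((reverse_adj.map Prod.snd).flatten).length + 1)
    [(start, 0)] PySem.Dict.empty).items

-- ===== PORT B =====
-- B's `while level` loop: gather callers of the whole level, ordered-dedup (dict.fromkeys =
-- PySem.List.dedup), filter against visited, bulk-assign distance d, recurse while d < max_depth
def pvLoopB (reverse_adj : List (String × List String)) (max_depth : Int)
    (d : Int) (level : List String) (visited : PySem.Dict String Int) :
    PySem.Dict String Int :=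
  if level = [] then visited
  else
    let callers := level.flatMap (pvAdjGet reverse_adj)
    let fresh := (PySem.List.dedup callers).filter (fun c => (visited.get? c).isNone)
    let visited' := fresh.foldl (fun v c => v.insert c d) visited
    if max_depth ≤ d then visited'
    else pvLoopB reverse_adj max_depth (d + 1) fresh visited'
termination_by (max_depth - d).toNat
decreasing_by rename_i _ h; simp only [not_le] at h; omega

def bfs_callers_py_alt (start : String) (reverse_adj : List (String × List String)) (max_depth : Int) : List (String × Int) :=
  if max_depth < 0 then (PySem.Dict.empty : PySem.Dict String Int).items
  else (pvLoopB reverse_adj max_depth 1 [start] PySem.Dict.empty).items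

-- ===== PRECONDITION & SPEC =====
def Spec_bfs_callers_py (start : String) (reverse_adj : List (String × List String)) (max_depth : Int) (out : List (String × Int)) : Prop := out = bfs_callers_py_alt start reverse_adj max_depth
instance (start : String) (reverse_adj : List (String × List String)) (max_depth : Int) (out : List (String × Int)) : Decidable (Spec_bfs_callers_py start reverse_adj max_depth out) := by unfold Spec_bfs_callers_py; infer_instance

-- ===== CLAIM (what is proved, stated in full; the proofs are below) =====
def Claim_equal_bfs_callers_py : Prop := ∀ (start : String) (reverse_adj : List (String × List String)) (max_depth : Int), Dom_bfs_callers_py start reverse_adj max_depth → Spec_bfs_callers_py start reverse_adj max_depth (bfs_callers_py start reverse_adj max_depth)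

-- ===== LEMMAS AND PROOFS =====

-- proof-side intermediate: the level-synchronous loop with A's INTERLEAVED inner body
-- (the bridge between A's queue and B's staged levels)
def pvStepI (max_depth depth : Int)
    (st : PySem.Dict String Int × List String) (caller : String) :
    PySem.Dict String Int × List String :=
  if (st.1.get? caller).isNone then
    (st.1.insert caller (depth + 1),
     if depth + 1 < max_depth then st.2 ++ [caller] else st.2)
  else st

def pvLoopI (reverse_adj : List (String × List String)) (max_depth : Int)
    (depth : Int) (frontier : List String) (visited : PySem.Dict String Int) :
    PySem.Dict String Int :=
  if frontier = [] ∨ max_depth < depth then visited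
  else
    let r := frontier.foldl
      (fun st node => (pvAdjGet reverse_adj node).foldl (pvStepI max_depth depth) st)
      (visited, [])
    pvLoopI reverse_adj max_depth (depth + 1) r.2 r.1
termination_by (max_depth + 1 - depth).toNat
decreasing_by
  rename_i h; simp only [not_or, not_lt] at h; omega

-- number of potential callers not yet visited (the fuel budget A can still consume)
def pvFree (reverse_adj : List (String × List String)) (v : PySem.Dict String Int) : Nat :=
  (((reverse_adj.map Prod.snd).flatten).dedup.filter (fun c => (v.get? c).isNone)).length

-- "finish level d from partial state": fold the remaining frontier, then continue at level d+1
def pvCont (reverse_adj : List (String × List String)) (max_depth depth : Int)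
    (rest acc : List String) (v : PySem.Dict String Int) : PySem.Dict String Int :=
  let r := rest.foldl
    (fun st node => (pvAdjGet reverse_adj node).foldl (pvStepI max_depth depth) st)
    (v, acc)
  pvLoopI reverse_adj max_depth (depth + 1) r.2 r.1

lemma pvLoopA_nil (adj : List (String × List String)) (md : Int) (f : Nat) (v : PySem.Dict String Int) :
    pvLoopA adj md f [] v = v := by cases f <;> rfl

lemma pvLoopI_stop (adj : List (String × List String)) (md d : Int) (fr : List String)
    (v : PySem.Dict String Int) (h : fr = [] ∨ md < d) :
    pvLoopI adj md d fr v = v := by rw [pvLoopI]; simp [h]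

lemma pvLoopI_step (adj : List (String × List String)) (md d : Int) (fr : List String)
    (v : PySem.Dict String Int) (h1 : fr ≠ []) (h2 : ¬ md < d) :
    pvLoopI adj md d fr v = pvCont adj md d fr [] v := by
  rw [pvLoopI]; simp [h1, h2, pvCont]

lemma pvAdjGet_sub (adj : List (String × List String)) (node : String) :
    ∀ c ∈ pvAdjGet adj node, c ∈ (adj.map Prod.snd).flatten := by
  intro c hc
  induction adj with
  | nil => simp [pvAdjGet, PySem.Dict.getD, PySem.Dict.get?] at hc
  | cons p t ih =>
    simp only [pvAdjGet, PySem.Dict.getD_eq_get?_getD] at hc ih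
    rw [PySem.Dict.get?_mk_cons] at hc
    by_cases h : p.1 == node
    · simp only [h, if_true, Option.getD_some] at hc
      exact List.mem_flatten.mpr ⟨p.2, by simp, hc⟩
    · simp only [h, if_false, Bool.false_eq_true] at hc
      obtain ⟨l, hl, hcl⟩ := List.mem_flatten.mp (ih hc)
      refine List.mem_flatten.mpr ⟨l, ?_, hcl⟩
      simp only [List.map_cons, List.mem_cons]
      exact Or.inr hl

lemma pvFilter_flip {α : Type} (l : List α) (c : α) (p q : α → Bool)
    (hnd : l.Nodup) (hc : c ∈ l) (hne : ∀ x ∈ l, x ≠ c → p x = q x)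
    (hpc : p c = false) (hqc : q c = true) :
    (l.filter p).length + 1 = (l.filter q).length := by
  induction l with
  | nil => cases hc
  | cons a t ih =>
    rcases List.nodup_cons.mp hnd with ⟨hat, hntd⟩
    rcases List.mem_cons.mp hc with rfl | hct
    · have hpq : ∀ x ∈ t, p x = q x := fun x hx =>
        hne x (List.mem_cons_of_mem _ hx) (fun he => hat (he ▸ hx))
      simp [hpc, hqc, List.filter_congr hpq]
    · have hac : a ≠ c := fun he => hat (he ▸ hct)
      have := ih hntd hct (fun x hx hxc => hne x (List.mem_cons_of_mem _ hx) hxc)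
      by_cases hpa : p a
      · have hqa : q a = true := (hne a List.mem_cons_self hac) ▸ hpa
        simp [hpa, hqa]; omega
      · have hqa : q a = false := by
          have := hne a List.mem_cons_self hac; simpa [hpa] using this.symm
        simp [hpa, hqa]; omega

lemma pvFree_insert (adj : List (String × List String)) (v : PySem.Dict String Int)
    (c : String) (x : Int) (hn : (v.get? c).isNone)
    (hc : c ∈ (adj.map Prod.snd).flatten) :
    pvFree adj (v.insert c x) + 1 = pvFree adj v := by
  unfold pvFree
  refine pvFilter_flip _ c _ _ (List.nodup_dedup _) (List.mem_dedup.mpr hc) ?_ ?_ ?_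
  · intro y _ hyc
    simp only [PySem.Dict.get?_insert_of_ne v x hyc]
  · simp only [PySem.Dict.get?_insert_self, Option.isNone_some]
  · simpa using hn

lemma pvFree_le (adj : List (String × List String)) (v : PySem.Dict String Int) :
    pvFree adj v ≤ ((adj.map Prod.snd).flatten).length :=
  le_trans (List.length_filter_le _ _) (List.Sublist.length_le (List.dedup_sublist _))

-- the two inner loops run in lock-step: same visited, same newly appended nodes
lemma pvInner (adj : List (String × List String)) (md d : Int) :
    ∀ (callers : List String), (∀ c ∈ callers, c ∈ (adj.map Prod.snd).flatten) →
    ∀ (v : PySem.Dict String Int) (qa : List (String × Int)) (qb : List String),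
    ∃ v' new,
      callers.foldl (pvStepA md d) (v, qa) = (v', qa ++ new.map (fun c => (c, d + 1))) ∧
      callers.foldl (pvStepI md d) (v, qb) = (v', qb ++ new) ∧
      new.length + pvFree adj v' ≤ pvFree adj v ∧
      (new ≠ [] → d + 1 < md) := by
  intro callers
  induction callers with
  | nil => intro _ v qa qb; exact ⟨v, [], by simp, by simp, by simp, by simp⟩
  | cons c cs ih =>
    intro hU v qa qb
    have hcU : c ∈ (adj.map Prod.snd).flatten := hU c List.mem_cons_self
    have hUcs : ∀ x ∈ cs, x ∈ (adj.map Prod.snd).flatten :=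
      fun x hx => hU x (List.mem_cons_of_mem _ hx)
    by_cases h : (v.get? c).isNone
    · by_cases hlt : d + 1 < md
      · obtain ⟨v', new', ha, hb, hbud, hne⟩ :=
          ih hUcs (v.insert c (d + 1)) (qa ++ [(c, d + 1)]) (qb ++ [c])
        refine ⟨v', c :: new', ?_, ?_, ?_, fun _ => hlt⟩
        · simpa [List.foldl_cons, pvStepA, h, hlt] using ha
        · simpa [List.foldl_cons, pvStepI, h, hlt] using hb
        · have := pvFree_insert adj v c (d + 1) h hcU
          simp only [List.length_cons]; omega
      · obtain ⟨v', new', ha, hb, hbud, hne⟩ :=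
          ih hUcs (v.insert c (d + 1)) qa qb
        refine ⟨v', new', ?_, ?_, ?_, hne⟩
        · simpa [List.foldl_cons, pvStepA, h, hlt] using ha
        · simpa [List.foldl_cons, pvStepI, h, hlt] using hb
        · have := pvFree_insert adj v c (d + 1) h hcU
          omega
    · obtain ⟨v', new', ha, hb, hbud, hne⟩ := ih hUcs v qa qb
      refine ⟨v', new', ?_, ?_, hbud, hne⟩
      · simpa [List.foldl_cons, pvStepA, h] using ha
      · simpa [List.foldl_cons, pvStepI, h] using hb

-- queue BFS with the queue split as "level d remainder ++ level d+1 prefix" equals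
-- finishing level d from that partial state and continuing level-synchronously
lemma pvMain (adj : List (String × List String)) (md : Int) :
    ∀ (n fuel : Nat) (d : Int) (rest acc : List String) (v : PySem.Dict String Int),
    2 * fuel + (if rest = [] then 1 else 0) ≤ n →
    ¬ md < d →
    (acc = [] ∨ d + 1 < md) →
    rest.length + acc.length + pvFree adj v ≤ fuel →
    pvLoopA adj md fuel (rest.map (fun c => (c, d)) ++ acc.map (fun c => (c, d + 1))) v
      = pvCont adj md d rest acc v := by
  intro n
  induction n with
  | zero =>
    intro fuel d rest acc v hm _ _ hbud
    cases rest with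
    | nil => simp at hm
    | cons a t => simp at hm hbud; omega
  | succ n ih =>
    intro fuel d rest acc v hm hd hacc hbud
    cases rest with
    | nil =>
      cases acc with
      | nil =>
        simp only [List.map_nil, List.nil_append, pvLoopA_nil]
        simp [pvCont, pvLoopI_stop adj md (d + 1) [] v (Or.inl rfl)]
      | cons a as =>
        have hlt : d + 1 < md := by
          rcases hacc with h | h
          · cases h
          · exact h
        have step1 : pvCont adj md d [] (a :: as) v
            = pvCont adj md (d + 1) (a :: as) [] v := by
          simp only [pvCont, List.foldl_nil]
          exact pvLoopI_step adj md (d + 1) (a :: as) v (by simp) (by omega)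
        rw [step1]
        have := ih fuel (d + 1) (a :: as) [] v
          (by simp at hm ⊢; omega) (by omega) (Or.inl rfl)
          (by simp at hbud ⊢; omega)
        simpa using this
    | cons c rest' =>
      cases fuel with
      | zero => simp at hbud
      | succ f =>
        simp only [List.map_cons, List.cons_append, pvLoopA]
        rw [if_neg hd]
        obtain ⟨v', new, ha, hb, hbudI, hnew⟩ :=
          pvInner adj md d (pvAdjGet adj c) (pvAdjGet_sub adj c) v
            (rest'.map (fun x => (x, d)) ++ acc.map (fun x => (x, d + 1))) acc
        simp only [ha]
        have hqs : (rest'.map (fun x => (x, d)) ++ acc.map (fun x => (x, d + 1)))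
            ++ new.map (fun x => (x, d + 1))
          = rest'.map (fun x => (x, d)) ++ (acc ++ new).map (fun x => (x, d + 1)) := by
          simp [List.map_append]
        rw [hqs]
        have hacc' : acc ++ new = [] ∨ d + 1 < md := by
          by_cases hn0 : new = []
          · rcases hacc with h | h
            · exact Or.inl (by simp [h, hn0])
            · exact Or.inr h
          · exact Or.inr (hnew hn0)
        have hrec := ih f d rest' (acc ++ new) v'
          (by by_cases h : rest' = [] <;> simp [h] at hm ⊢ <;> omega) hd hacc'
          (by simp at hbud ⊢; omega)
        rw [hrec]
        simp only [pvCont, List.foldl_cons, hb]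

-- ordered dedup (dict.fromkeys), unfolded one element: first occurrence kept, the rest erased
lemma pvFoldlAdd (cs : List String) : ∀ (s : List String),
    cs.foldl PySem.Set.add s
      = s ++ (PySem.Set.ofList cs).filter (fun y => !s.contains y) := by
  induction cs with
  | nil => intro s; simp [PySem.Set.ofList]
  | cons c cs ih =>
    intro s
    have hof : PySem.Set.ofList (c :: cs)
        = [c] ++ (PySem.Set.ofList cs).filter (fun y => !([c].contains y)) := by
      rw [PySem.Set.ofList_eq_foldl, List.foldl_cons]
      have : PySem.Set.add ([] : List String) c = [c] := by
        simp [PySem.Set.add, PySem.Set.contains]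
      rw [this, ih]
    rw [List.foldl_cons, ih, hof]
    by_cases hc : c ∈ s
    · have hadd : PySem.Set.add s c = s := by
        simp [PySem.Set.add, PySem.Set.contains, List.contains_eq_mem, hc]
      rw [hadd, List.filter_append, List.filter_filter]
      have h1 : List.filter (fun y => !s.contains y) [c] = [] := by
        simp [List.contains_eq_mem, hc]
      rw [h1, List.nil_append]
      congr 1
      refine (List.filter_congr fun y _ => ?_).symm
      by_cases hyc : y = c
      · subst hyc; simp [List.contains_eq_mem, hc]
      · simp [List.contains_eq_mem, hyc]
    · have hadd : PySem.Set.add s c = s ++ [c] := by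
        simp [PySem.Set.add, PySem.Set.contains, List.contains_eq_mem, hc]
      rw [hadd, List.filter_append, List.filter_filter]
      have h1 : List.filter (fun y => !s.contains y) [c] = [c] := by
        simp [List.contains_eq_mem, hc]
      rw [h1, List.append_assoc]
      congr 2
      refine (List.filter_congr fun y _ => ?_).symm
      by_cases hyc : y = c
      · subst hyc; simp [List.contains_eq_mem, hc]
      · simp [List.contains_eq_mem, hyc]

lemma pvDedupCons (c : String) (cs : List String) :
    PySem.List.dedup (c :: cs)
      = c :: (PySem.List.dedup cs).filter (fun y => !(y == c)) := by
  simp only [PySem.List.dedup_eq_ofList]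
  rw [PySem.Set.ofList_eq_foldl, List.foldl_cons]
  have : PySem.Set.add ([] : List String) c = [c] := by
    simp [PySem.Set.add, PySem.Set.contains]
  rw [this, pvFoldlAdd]
  simp only [List.singleton_append, List.cons.injEq, true_and]
  refine List.filter_congr (fun y _ => ?_)
  by_cases hyc : y = c <;> simp [hyc]

-- A's interleaved inner level fold = B's staged computation (dedup, filter, bulk insert)
lemma pvStaged (md d : Int) : ∀ (callers : List String) (v : PySem.Dict String Int)
    (qb : List String),
    callers.foldl (pvStepI md d) (v, qb)
      = (((PySem.List.dedup callers).filter (fun c => (v.get? c).isNone)).foldl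
            (fun w c => w.insert c (d + 1)) v,
         qb ++ (if d + 1 < md
                then (PySem.List.dedup callers).filter (fun c => (v.get? c).isNone)
                else [])) := by
  intro callers
  induction callers with
  | nil =>
    intro v qb
    simp [PySem.List.dedup, PySem.Set.ofList]
  | cons c cs ih =>
    intro v qb
    rw [pvDedupCons]
    by_cases h : (v.get? c).isNone
    · have hfc : ((PySem.List.dedup cs).filter (fun y => !(y == c))).filter
          (fun y => (v.get? y).isNone)
          = (PySem.List.dedup cs).filter (fun y => ((v.insert c (d + 1)).get? y).isNone) := by
        rw [List.filter_filter]
        refine List.filter_congr (fun y _ => ?_)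
        by_cases hyc : y = c
        · subst hyc; simp [PySem.Dict.get?_insert_self]
        · simp [PySem.Dict.get?_insert_of_ne v (d + 1) hyc, hyc]
      have hfilt : List.filter (fun y => (v.get? y).isNone)
          (c :: (PySem.List.dedup cs).filter (fun y => !(y == c)))
          = c :: (PySem.List.dedup cs).filter
              (fun y => ((v.insert c (d + 1)).get? y).isNone) := by
        simp only [List.filter_cons, h, if_pos]
        rw [hfc]
      by_cases hlt : d + 1 < md
      · have hstep : pvStepI md d (v, qb) c = (v.insert c (d + 1), qb ++ [c]) := by
          simp [pvStepI, h, hlt]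
        rw [List.foldl_cons, hstep, ih, if_pos hlt, if_pos hlt, hfilt]
        simp [List.foldl_cons, List.append_assoc]
      · have hstep : pvStepI md d (v, qb) c = (v.insert c (d + 1), qb) := by
          simp [pvStepI, h, hlt]
        rw [List.foldl_cons, hstep, ih, if_neg hlt, if_neg hlt, hfilt]
        simp [List.foldl_cons]
    · have hstep : pvStepI md d (v, qb) c = (v, qb) := by simp [pvStepI, h]
      have hfc : (c :: (PySem.List.dedup cs).filter (fun y => !(y == c))).filter
          (fun y => (v.get? y).isNone)
          = (PySem.List.dedup cs).filter (fun y => (v.get? y).isNone) := by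
        simp only [List.filter_cons, h, Bool.false_eq_true, if_false]
        rw [List.filter_filter]
        refine List.filter_congr (fun y _ => ?_)
        by_cases hyc : y = c
        · subst hyc; simp [h]
        · simp [hyc]
      rw [List.foldl_cons, hstep, ih, hfc]

-- the interleaved level loop at depth d equals B's staged loop at distance d+1
lemma pvBridge (adj : List (String × List String)) (md : Int) :
    ∀ (n : Nat) (d : Int) (fr : List String) (v : PySem.Dict String Int),
    (md - d).toNat ≤ n → ¬ md < d →
    pvLoopI adj md d fr v = pvLoopB adj md (d + 1) fr v := by
  intro n
  induction n with
  | zero =>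
    intro d fr v hn hd
    have hmd : md = d := by omega
    cases fr with
    | nil =>
      rw [pvLoopI_stop adj md d [] v (Or.inl rfl), pvLoopB]
      simp
    | cons a t =>
      rw [pvLoopI_step adj md d (a :: t) v (by simp) hd, pvCont,
        List.foldl_flatMap.symm, pvStaged md d, pvLoopB]
      have hlt : ¬ d + 1 < md := by omega
      simp only [hlt, if_false, List.append_nil]
      rw [pvLoopI_stop adj md (d + 1) [] _ (Or.inl rfl)]
      simp [hmd]
  | succ n ih =>
    intro d fr v hn hd
    cases fr with
    | nil =>
      rw [pvLoopI_stop adj md d [] v (Or.inl rfl), pvLoopB]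
      simp
    | cons a t =>
      rw [pvLoopI_step adj md d (a :: t) v (by simp) hd, pvCont,
        List.foldl_flatMap.symm, pvStaged md d, pvLoopB]
      simp only [List.nil_append, reduceCtorEq, if_false]
      by_cases hlt : d + 1 < md
      · have hle : ¬ md ≤ d + 1 := by omega
        simp only [hlt, if_pos, hle, if_false]
        exact ih (d + 1) _ _ (by omega) (by omega)
      · have hle : md ≤ d + 1 := by omega
        simp only [hlt, if_false, hle, if_pos]
        exact pvLoopI_stop adj md (d + 1) [] _ (Or.inl rfl)

theorem bfs_callers_py_spec : Claim_equal_bfs_callers_py := by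
  intro start adj md _
  unfold Spec_bfs_callers_py bfs_callers_py bfs_callers_py_alt
  by_cases h0 : md < 0
  · have : pvLoopA adj md (((adj.map Prod.snd).flatten).length + 1)
        [(start, 0)] PySem.Dict.empty = PySem.Dict.empty := by
      simp only [pvLoopA, if_pos h0, pvLoopA_nil]
    rw [this, if_pos h0]
  · rw [if_neg h0]
    congr 1
    have hmain := pvMain adj md (2 * (((adj.map Prod.snd).flatten).length + 1) + 1)
      (((adj.map Prod.snd).flatten).length + 1) 0 [start] [] PySem.Dict.empty
      (by simp) h0 (Or.inl rfl)
      (by have := pvFree_le adj (PySem.Dict.empty : PySem.Dict String Int)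
          simp only [List.length_cons, List.length_nil]; omega)
    simp only [List.map_cons, List.map_nil,
      List.append_nil] at hmain
    rw [hmain, ← pvLoopI_step adj md 0 [start] PySem.Dict.empty (by simp) h0]
    have := pvBridge adj md md.toNat 0 [start] PySem.Dict.empty (by omega) h0
    simpa using this
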